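-- pv_equiv track=rewrite | github.com/krzysztof-turowski/string-algorithms | approx_shortest_superstring/approximate_shortest_superstring.py | get_word_to_merges
-- ===== SOURCE A (Python) =====
-- def get_all_merges(word1, word2):
--   result = []
--   for length_of_common_segment in range(0, len(word1)):
--     if (word1[len(word1) - length_of_common_segment : ] ==
--         word2[1 : 1 + length_of_common_segment]):
--       result.append(word1 + word2[1 + length_of_common_segment :])
--     if (word2[len(word2) - length_of_common_segment : ] ==
--         word1[1 : 1 + length_of_common_segment]):
--       result.append(word2 + word1[1 + length_of_common_segment :])
--   return result
--
-- def get_word_to_merges(words):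
--   result = {}
--   for i, word in enumerate(words):
--     for j in range (i+1, len(words)):
--       if word < words[j]:
--         result[(word, words[j])] = get_all_merges(word, words[j])
--       else:
--         result[(words[j], word)] = get_all_merges(words[j], word)
--   return result
-- ===== SOURCE B (Python) =====
-- # B: per pair, the valid overlap lengths are found all at once with a Z-function
-- # on p + '\x00' + x instead of comparing one pair of slices per candidate length.
--
-- def _z_function(t):
--   n = len(t)
--   z = [0] * n
--   l = r = 0
--   for i in range(1, n):
--     zi = 0
--     if i < r:
--       zi = min(r - i, z[i - l])
--     while i + zi < n and t[zi] == t[i + zi]: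
--       zi += 1
--     z[i] = zi
--     if i + zi > r:
--       l, r = i, i + zi
--   return z
--
-- def _overlap_lengths(x, p):
--   # {k >= 1 : x[len(x)-k:] == p[:k]}, both slices of full length k
--   t = p + '\x00' + x
--   z = _z_function(t)
--   n = len(t)
--   return {n - i for i in range(len(p) + 1, n) if z[i] == n - i}
--
-- def _merges(w1, w2):
--   ks1 = _overlap_lengths(w1, w2[1:])
--   ks2 = _overlap_lengths(w2, w1[1:])
--   out = []
--   for k in range(len(w1)):
--     if k == 0 or k in ks1:
--       out.append(w1 + w2[1 + k:])
--     if k == 0 or k in ks2: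
--       out.append(w2 + w1[1 + k:])
--   return out
--
-- def get_word_to_merges(words):
--   result = {}
--   for i in range(len(words)):
--     for j in range(i + 1, len(words)):
--       a, b = words[i], words[j]
--       if not a < b:
--         a, b = b, a
--       result[(a, b)] = _merges(a, b)
--   return result
-- ===== Notes on version B (the rewrite author's own statement) =====
-- stated objective: alternative
-- what changed: Per pair of words, A tests every candidate overlap length by comparing a fresh pair of slices; B computes the set of valid overlap lengths at once with a Z-function over p + '\x00' + x and then only assembles the matched merge strings (B also indexes pairs directly instead of enumerate and re-sorting each pair with two dict inserts).
import Mathlib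
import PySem

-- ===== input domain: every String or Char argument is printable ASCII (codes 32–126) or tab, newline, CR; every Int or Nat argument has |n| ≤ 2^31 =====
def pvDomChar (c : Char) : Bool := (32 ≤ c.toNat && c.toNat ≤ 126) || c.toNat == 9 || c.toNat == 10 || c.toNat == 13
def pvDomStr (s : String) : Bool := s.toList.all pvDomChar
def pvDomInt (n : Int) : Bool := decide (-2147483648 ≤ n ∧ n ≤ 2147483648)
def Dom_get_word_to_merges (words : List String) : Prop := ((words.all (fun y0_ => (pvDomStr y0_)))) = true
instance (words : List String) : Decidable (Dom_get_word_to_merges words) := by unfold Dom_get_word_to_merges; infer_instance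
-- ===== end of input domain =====

-- B finds each pair's valid overlap lengths with a Z-function on p ++ '\x00' ++ x
-- instead of A's comparison of one pair of slices per candidate length; both
-- return the same association list.

-- ===== PORT A =====
-- strings are handled as their char lists (PySem string slicing is defined on toList)
def get_all_merges (word1 word2 : String) : List String :=
  let w1 := word1.toList
  let w2 := word2.toList
  (PySem.List.pyRange 0 (w1.length : Int) 1).foldl (fun result k =>
    let result :=
      if PySem.List.slice w1 (some ((w1.length : Int) - k)) none
         = PySem.List.slice w2 (some 1) (some (1 + k)) then
        result ++ [String.ofList (w1 ++ PySem.List.slice w2 (some (1 + k)) none)]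
      else result
    if PySem.List.slice w2 (some ((w2.length : Int) - k)) none
       = PySem.List.slice w1 (some 1) (some (1 + k)) then
      result ++ [String.ofList (w2 ++ PySem.List.slice w1 (some (1 + k)) none)]
    else result) []

def get_word_to_merges (words : List String) : List (String × String × List String) :=
  (((PySem.List.enumerate words 0).foldl
      (fun (result : PySem.Dict (String × String) (List String)) iw =>
        (PySem.List.pyRange (iw.1 + 1) (words.length : Int) 1).foldl (fun result j =>
          let wj := PySem.List.pyGetD words j ""
          if iw.2 < wj then result.insert (iw.2, wj) (get_all_merges iw.2 wj)
          else result.insert (wj, iw.2) (get_all_merges wj iw.2)) result)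
      PySem.Dict.empty).items).map (fun kv => (kv.1.1, kv.1.2, kv.2))

-- ===== PORT B =====
-- the inner while of _z_function (extend the match one char at a time)
def zExtend (t : List Char) (i : Nat) (zi : Nat) : Nat :=
  if h : i + zi < t.length ∧ t.getD zi ' ' = t.getD (i + zi) ' ' then
    zExtend t i (zi + 1)
  else zi
termination_by t.length - (i + zi)
decreasing_by omega

-- _z_function: state (z, l, r); z is preallocated with zeros
def zFun (t : List Char) : List Nat :=
  ((List.range' 1 (t.length - 1)).foldl
    (fun (s : List Nat × Nat × Nat) i =>
      let zi0 := if i < s.2.2 then min (s.2.2 - i) (s.1.getD (i - s.2.1) 0) else 0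
      let zi := zExtend t i zi0
      let z := s.1.set i zi
      if s.2.2 < i + zi then (z, i, i + zi) else (z, s.2.1, s.2.2))
    (List.replicate t.length 0, 0, 0)).1

-- _overlap_lengths (a Python set, consumed only through membership tests)
def overlapLengths (x p : List Char) : PySem.Set Nat :=
  let t := p ++ '\x00' :: x
  let n := t.length
  let z := zFun t
  PySem.Set.ofList (((List.range' (p.length + 1) (n - (p.length + 1))).filter
    (fun i => z.getD i 0 == n - i)).map (fun i => n - i))

-- _merges
def mergesAlt (w1 w2 : String) : List String :=
  let x1 := w1.toList
  let x2 := w2.toList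
  let ks1 := overlapLengths x1 (x2.drop 1)
  let ks2 := overlapLengths x2 (x1.drop 1)
  (List.range x1.length).foldl (fun out k =>
    let out := if k = 0 ∨ k ∈ ks1 then out ++ [String.ofList (x1 ++ x2.drop (1 + k))] else out
    if k = 0 ∨ k ∈ ks2 then out ++ [String.ofList (x2 ++ x1.drop (1 + k))] else out) []

def get_word_to_merges_alt (words : List String) : List (String × String × List String) :=
  (((List.range words.length).foldl
      (fun (result : PySem.Dict (String × String) (List String)) i =>
        (List.range' (i + 1) (words.length - (i + 1))).foldl (fun result j =>
          let a := words.getD i ""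
          let b := words.getD j ""
          let ab := if ¬ a < b then (b, a) else (a, b)
          result.insert ab (mergesAlt ab.1 ab.2)) result)
      PySem.Dict.empty).items).map (fun kv => (kv.1.1, kv.1.2, kv.2))

-- ===== PRECONDITION & SPEC =====
def Spec_get_word_to_merges (words : List String) (out : List (String × String × List String)) : Prop := out = get_word_to_merges_alt words
instance (words : List String) (out : List (String × String × List String)) : Decidable (Spec_get_word_to_merges words out) := by unfold Spec_get_word_to_merges; infer_instance

-- ===== CLAIM (what is proved, stated in full; the proofs are below) =====
def Claim_equal_get_word_to_merges : Prop := ∀ (words : List String), Dom_get_word_to_merges words → Spec_get_word_to_merges words (get_word_to_merges words)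

-- ===== LEMMAS AND PROOFS =====

-- the length of the longest common prefix of two char lists
def lcp : List Char → List Char → Nat
  | a :: as, b :: bs => if a = b then lcp as bs + 1 else 0
  | _, _ => 0

theorem lcp_cons_cons (x y : Char) (as bs : List Char) :
    lcp (x :: as) (y :: bs) = if x = y then lcp as bs + 1 else 0 := rfl

theorem lcp_le_right (a b : List Char) : lcp a b ≤ b.length := by
  induction a generalizing b with
  | nil => simp [lcp]
  | cons x as ih =>
    cases b with
    | nil => simp [lcp]
    | cons y bs => simp only [lcp]; split <;> simp [ih]

theorem lcp_getD (a b : List Char) (j : Nat) (h : j < lcp a b) (d : Char) :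
    a.getD j d = b.getD j d := by
  induction a generalizing b j with
  | nil => simp [lcp] at h
  | cons x as ih =>
    cases b with
    | nil => simp [lcp] at h
    | cons y bs =>
      simp only [lcp] at h
      split at h
      · cases j with
        | zero => simpa using ‹x = y›
        | succ j => simpa using ih bs j (by omega)
      · omega

theorem lcp_ne (a b : List Char) (h1 : lcp a b < a.length) (h2 : lcp a b < b.length) (d : Char) :
    a.getD (lcp a b) d ≠ b.getD (lcp a b) d := by
  induction a generalizing b with
  | nil => simp at h1
  | cons x as ih =>
    cases b with
    | nil => simp at h2
    | cons y bs =>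
      by_cases hxy : x = y
      · have e : lcp (x :: as) (y :: bs) = lcp as bs + 1 := by simp [lcp, hxy]
        rw [e] at h1 h2 ⊢
        simpa using ih bs (by simpa using h1) (by simpa using h2)
      · have e : lcp (x :: as) (y :: bs) = 0 := by simp [lcp, hxy]
        rw [e]; simpa using hxy

theorem le_lcp (a b : List Char) (m : Nat) (hm1 : m ≤ a.length) (hm2 : m ≤ b.length)
    (h : ∀ j < m, a.getD j ' ' = b.getD j ' ') : m ≤ lcp a b := by
  rcases Nat.lt_or_ge (lcp a b) m with hlt | hge
  · exact absurd (h _ hlt)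
      (lcp_ne a b (lt_of_lt_of_le hlt hm1) (lt_of_lt_of_le hlt hm2) ' ')
  · exact hge

theorem lcp_nil_right (a : List Char) : lcp a [] = 0 := by cases a <;> rfl

theorem lcp_take (a b : List Char) : a.take (lcp a b) = b.take (lcp a b) := by
  induction a generalizing b with
  | nil => simp [lcp]
  | cons x as ih =>
    cases b with
    | nil => simp [lcp_nil_right]
    | cons y bs =>
      rw [lcp_cons_cons]
      split_ifs with hxy
      · simp only [List.take_succ_cons, hxy, ih bs]
      · simp

theorem lcp_eq_right_iff (a b : List Char) (h : b.length ≤ a.length) :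
    lcp a b = b.length ↔ b <+: a := by
  induction b generalizing a with
  | nil => simp [lcp_nil_right]
  | cons y bs ih =>
    cases a with
    | nil => simp at h
    | cons x as =>
      rw [lcp_cons_cons]
      split_ifs with hxy
      · simp only [List.length_cons, List.cons_prefix_cons]
        constructor
        · intro hh; exact ⟨hxy.symm, (ih as (by simpa using h)).1 (by omega)⟩
        · intro ⟨_, hp⟩; have := (ih as (by simpa using h)).2 hp; omega
      · simp only [List.length_cons, List.cons_prefix_cons]
        constructor
        · omega
        · intro ⟨hyx, _⟩; exact absurd hyx.symm hxy

theorem getD_drop (t : List Char) (i j : Nat) (d : Char) :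
    (t.drop i).getD j d = t.getD (i + j) d := by
  simp [List.getD_eq_getElem?_getD, List.getElem?_drop]

theorem zExtend_eq_lcp (t : List Char) (i z0 : Nat) :
    z0 ≤ lcp t (t.drop i) → zExtend t i z0 = lcp t (t.drop i) := by
  induction z0 using zExtend.induct t i with
  | case1 zi hc ih =>
    intro h
    rw [zExtend, dif_pos hc]
    apply ih
    rcases Nat.lt_or_ge zi (lcp t (t.drop i)) with hlt | hge
    · omega
    · exfalso
      have heq : zi = lcp t (t.drop i) := le_antisymm h hge
      have hlr : lcp t (t.drop i) ≤ (t.drop i).length := lcp_le_right t (t.drop i)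
      have h2 : lcp t (t.drop i) < (t.drop i).length := by
        simp only [List.length_drop] at hlr ⊢; omega
      have h1 : lcp t (t.drop i) < t.length := by omega
      apply lcp_ne t (t.drop i) h1 h2 ' '
      rw [← heq] at *
      rw [getD_drop]
      exact hc.2
  | case2 zi hc =>
    intro h
    rw [zExtend, dif_neg hc]
    rcases Nat.lt_or_ge zi (lcp t (t.drop i)) with hlt | hge
    · exfalso
      apply hc
      have hlr : lcp t (t.drop i) ≤ (t.drop i).length := lcp_le_right t (t.drop i)
      simp only [List.length_drop] at hlr
      constructor
      · omega
      · have := lcp_getD t (t.drop i) zi hlt ' '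
        rw [getD_drop] at this
        exact this
    · omega

-- the loop invariant of _z_function: entries below i are correct, (l, r) is a
-- valid Z-box (t[l:r] = t[:r-l])
def ZInv (t : List Char) (i : Nat) (s : List Nat × Nat × Nat) : Prop :=
  s.1.length = t.length ∧
  (∀ j, 1 ≤ j → j < i → s.1.getD j 0 = lcp t (t.drop j)) ∧
  s.2.1 ≤ s.2.2 ∧ s.2.2 ≤ t.length ∧ s.2.1 < i ∧ (s.2.2 ≠ 0 → 1 ≤ s.2.1) ∧
  (t.drop s.2.1).take (s.2.2 - s.2.1) = t.take (s.2.2 - s.2.1)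

theorem box_getD (t : List Char) (l r : Nat)
    (hbox : (t.drop l).take (r - l) = t.take (r - l)) (idx : Nat) (hidx : idx < r - l) :
    t.getD (l + idx) ' ' = t.getD idx ' ' := by
  have := congrArg (fun u => u[idx]?) hbox
  simp only [List.getElem?_take, hidx, if_pos, List.getElem?_drop] at this
  simp [List.getD_eq_getElem?_getD, this]

theorem zstep (t : List Char) (i : Nat) (s : List Nat × Nat × Nat)
    (hi1 : 1 ≤ i) (hi2 : i < t.length) (hs : ZInv t i s) :
    ZInv t (i+1)
      ((fun (s : List Nat × Nat × Nat) i =>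
        let zi0 := if i < s.2.2 then min (s.2.2 - i) (s.1.getD (i - s.2.1) 0) else 0
        let zi := zExtend t i zi0
        let z := s.1.set i zi
        if s.2.2 < i + zi then (z, i, i + zi) else (z, s.2.1, s.2.2)) s i) := by
  obtain ⟨z, l, r⟩ := s
  obtain ⟨hzlen, hzcorr, hlr, hrn, hli, hl1, hbox⟩ := hs
  simp only at hzlen hzcorr hlr hrn hli hl1 hbox
  simp only []
  set zi0 := if i < r then min (r - i) (z.getD (i - l) 0) else 0 with hzi0def
  have hdroplen : (t.drop i).length = t.length - i := by simp
  have hzi0 : zi0 ≤ lcp t (t.drop i) := by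
    rw [hzi0def]
    split
    case isTrue hir =>
      have hl1' : 1 ≤ l := hl1 (by omega)
      have hjw : z.getD (i - l) 0 = lcp t (t.drop (i - l)) := hzcorr (i - l) (by omega) (by omega)
      rw [hjw]
      set w := lcp t (t.drop (i - l)) with hwdef
      apply le_lcp
      · omega
      · omega
      · intro j hj
        have h1 : t.getD (i + j) ' ' = t.getD ((i - l) + j) ' ' := by
          have := box_getD t l r hbox ((i - l) + j) (by omega)
          have he : l + ((i - l) + j) = i + j := by omega
          rw [he] at this
          rw [this]
        have h2 : t.getD j ' ' = t.getD ((i - l) + j) ' ' := by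
          have hwl : w ≤ (t.drop (i-l)).length := lcp_le_right t (t.drop (i-l))
          have := lcp_getD t (t.drop (i - l)) j (by omega) ' '
          rw [getD_drop] at this
          exact this
        rw [getD_drop, h1, h2]
    case isFalse => omega
  have hzi : zExtend t i zi0 = lcp t (t.drop i) := zExtend_eq_lcp t i zi0 hzi0
  have hlcple : lcp t (t.drop i) ≤ t.length - i := by
    have := lcp_le_right t (t.drop i)
    simp only [List.length_drop] at this
    omega
  have hznew : ∀ j, 1 ≤ j → j < i + 1 →
      (z.set i (zExtend t i zi0)).getD j 0 = lcp t (t.drop j) := by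
    intro j hj1 hj2
    by_cases hji : j = i
    · subst hji
      simp [List.getD_eq_getElem?_getD, List.getElem?_set_self (by omega : j < z.length), hzi]
    · rw [List.getD_eq_getElem?_getD, List.getElem?_set_ne (by omega), ← List.getD_eq_getElem?_getD]
      exact hzcorr j hj1 (by omega)
  split
  case isTrue hlt =>
    refine ⟨by simp [hzlen], hznew, ?_, ?_, ?_, ?_, ?_⟩ <;> dsimp only
    · omega
    · omega
    · omega
    · omega
    · have : i + zExtend t i zi0 - i = zExtend t i zi0 := by omega
      rw [this, hzi]
      exact (lcp_take t (t.drop i)).symm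
  case isFalse hge =>
    refine ⟨by simp [hzlen], hznew, ?_, ?_, ?_, ?_, ?_⟩ <;> dsimp only
    · exact hlr
    · exact hrn
    · omega
    · exact hl1
    · exact hbox

theorem zfold (t : List Char) (m : Nat) : ∀ (i : Nat) (s : List Nat × Nat × Nat),
    1 ≤ i → i + m ≤ t.length → ZInv t i s →
    ZInv t (i + m) ((List.range' i m).foldl
      (fun (s : List Nat × Nat × Nat) i =>
        let zi0 := if i < s.2.2 then min (s.2.2 - i) (s.1.getD (i - s.2.1) 0) else 0
        let zi := zExtend t i zi0
        let z := s.1.set i zi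
        if s.2.2 < i + zi then (z, i, i + zi) else (z, s.2.1, s.2.2)) s) := by
  induction m with
  | zero => intro i s _ _ hs; simpa using hs
  | succ m ih =>
    intro i s hi him hs
    rw [List.range'_succ, List.foldl_cons]
    have := ih (i + 1) _ (by omega) (by omega) (zstep t i s hi (by omega) hs)
    have he : i + (m + 1) = (i + 1) + m := by omega
    rw [he]
    exact this

theorem zFun_correct (t : List Char) (i : Nat) (h1 : 1 ≤ i) (h2 : i < t.length) :
    (zFun t).getD i 0 = lcp t (t.drop i) := by
  have hinit : ZInv t 1 (List.replicate t.length 0, 0, 0) := by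
    refine ⟨by simp, ?_, ?_, ?_, ?_, ?_, ?_⟩ <;> dsimp only
    · intro j hj1 hj2; omega
    · omega
    · omega
    · omega
    · omega
    · simp
  have := zfold t (t.length - 1) 1 _ (by omega) (by omega) hinit
  have he : 1 + (t.length - 1) = t.length := by omega
  rw [he] at this
  unfold zFun
  exact this.2.1 i h1 h2

-- membership in _overlap_lengths is exactly 'suffix of x of length k = prefix of p
-- of length k' (the separator is outside the domain alphabet, hence hx)
theorem mem_overlapLengths (x p : List Char) (hx : '\x00' ∉ x) (k : Nat) :
    k ∈ overlapLengths x p ↔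
      1 ≤ k ∧ k ≤ x.length ∧ k ≤ p.length ∧ x.drop (x.length - k) = p.take k := by
  unfold overlapLengths
  rw [PySem.Set.mem_ofList]
  simp only [List.mem_map, List.mem_filter, List.mem_range'_1, beq_iff_eq]
  have hlen : (p ++ '\x00' :: x).length = p.length + 1 + x.length := by simp; omega
  have hdropx : ∀ i, p.length + 1 ≤ i →
      (p ++ '\x00' :: x).drop i = x.drop (i - (p.length + 1)) := by
    intro i hi
    rw [List.drop_append, List.drop_eq_nil_of_le (by omega), List.nil_append]
    have hm : i - p.length = (i - (p.length + 1)) + 1 := by omega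
    rw [hm, List.drop_succ_cons]
  constructor
  · rintro ⟨i, ⟨⟨hi1, hi2⟩, hz⟩, rfl⟩
    rw [hlen] at hi2 ⊢
    have hi2' : i < (p ++ '\x00' :: x).length := by rw [hlen]; omega
    rw [zFun_correct _ i (by omega) hi2'] at hz
    have hpre : (p ++ '\x00' :: x).drop i <+: (p ++ '\x00' :: x) := by
      rw [← lcp_eq_right_iff _ _ (by simp)]
      rw [hz, List.length_drop, hlen]
    have htake : (p ++ '\x00' :: x).drop i
        = (p ++ '\x00' :: x).take (p.length + 1 + x.length - i) := by
      have := List.prefix_iff_eq_take.1 hpre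
      rwa [List.length_drop, hlen] at this
    set k := p.length + 1 + x.length - i with hkdef
    have hk1 : 1 ≤ k := by omega
    have hk2 : k ≤ x.length := by omega
    have hkp : k ≤ p.length := by
      rcases Nat.lt_or_ge p.length k with hgt | hok
      · exfalso
        apply hx
        have hmem : '\x00' ∈ (p ++ '\x00' :: x).take k := by
          rw [List.take_append, List.take_of_length_le (by omega)]
          refine List.mem_append_right _ ?_
          have hm : k - p.length = (k - p.length - 1) + 1 := by omega
          rw [hm, List.take_succ_cons]
          exact List.mem_cons_self
        rw [← htake, hdropx i (by omega)] at hmem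
        exact List.mem_of_mem_drop hmem
      · exact hok
    refine ⟨hk1, hk2, hkp, ?_⟩
    have := htake
    rw [hdropx i (by omega)] at this
    have hidx : i - (p.length + 1) = x.length - k := by omega
    rw [hidx] at this
    rw [this, List.take_append_of_le_length hkp]
  · rintro ⟨hk1, hk2, hk3, heq⟩
    refine ⟨p.length + 1 + x.length - k, ⟨⟨by omega, by rw [hlen]; omega⟩, ?_⟩, by rw [hlen]; omega⟩
    set i := p.length + 1 + x.length - k with hidef
    have hi2 : i < (p ++ '\x00' :: x).length := by rw [hlen]; omega
    rw [zFun_correct _ i (by omega) hi2]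
    have hdi : (p ++ '\x00' :: x).drop i = (p ++ '\x00' :: x).take k := by
      rw [hdropx i (by omega)]
      have : i - (p.length + 1) = x.length - k := by omega
      rw [this, heq, List.take_append_of_le_length hk3]
    have : lcp (p ++ '\x00' :: x) ((p ++ '\x00' :: x).drop i)
        = ((p ++ '\x00' :: x).drop i).length := by
      rw [lcp_eq_right_iff _ _ (by simp)]
      rw [hdi]
      exact List.take_prefix _ _
    rw [this, List.length_drop, hlen]

-- condition 1 of A at loop index k equals condition 1 of B
theorem condA1_iff (x1 x2 : List Char) (k : Nat) (hk : k < x1.length) (hx : '\x00' ∉ x1) :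
    (x1.drop (x1.length - k) = (x2.drop 1).take k) ↔
      (k = 0 ∨ k ∈ overlapLengths x1 (x2.drop 1)) := by
  constructor
  · intro he
    rcases Nat.eq_zero_or_pos k with h0 | h1
    · exact Or.inl h0
    · refine Or.inr ((mem_overlapLengths x1 (x2.drop 1) hx k).2 ⟨h1, by omega, ?_, he⟩)
      have hl := congrArg List.length he
      simp only [List.length_drop, List.length_take] at hl ⊢
      omega
  · rintro (h0 | hm)
    · subst h0; simp
    · exact ((mem_overlapLengths x1 (x2.drop 1) hx k).1 hm).2.2.2

-- condition 2 of A at loop index k (slice start may be negative) equals condition 2 of B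
theorem condA2_iff (x1 x2 : List Char) (k : Nat) (hk : k < x1.length) (hx : '\x00' ∉ x2) :
    (PySem.List.slice x2 (some ((x2.length : Int) - (k : Int))) none = (x1.drop 1).take k) ↔
      (k = 0 ∨ k ∈ overlapLengths x2 (x1.drop 1)) := by
  rcases Nat.lt_or_ge x2.length k with hgt | hle
  case inl =>
    rw [PySem.List.slice_some_none]
    constructor
    · intro he
      exfalso
      have hl := congrArg List.length he
      have hcl := PySem.List.clampIdx_le x2.length ((x2.length : Int) - (k : Int))
      simp only [List.length_drop, List.length_take] at hl ⊢
      omega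
    · rintro (h0 | hm)
      · omega
      · have := ((mem_overlapLengths x2 (x1.drop 1) hx k).1 hm).2.1
        omega
  case inr =>
    have hc : ((x2.length : Int) - (k : Int)) = ((x2.length - k : Nat) : Int) := by
      push_cast [hle]; ring
    rw [hc, PySem.List.slice_from_natCast]
    constructor
    · intro he
      rcases Nat.eq_zero_or_pos k with h0 | h1
      · exact Or.inl h0
      · refine Or.inr ((mem_overlapLengths x2 (x1.drop 1) hx k).2 ⟨h1, hle, ?_, he⟩)
        have hl := congrArg List.length he
        simp only [List.length_drop, List.length_take] at hl ⊢
        omega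
    · rintro (h0 | hm)
      · subst h0; simp
      · exact ((mem_overlapLengths x2 (x1.drop 1) hx k).1 hm).2.2.2

theorem get_all_merges_eq (w1 w2 : String)
    (h1 : '\x00' ∉ w1.toList) (h2 : '\x00' ∉ w2.toList) :
    get_all_merges w1 w2 = mergesAlt w1 w2 := by
  unfold get_all_merges mergesAlt
  dsimp only
  rw [PySem.List.pyRange_zero_natCast, List.foldl_map]
  apply PySem.List.foldl_congr_mem
  intro acc k hk
  rw [List.mem_range] at hk
  have e1 : ((w1.toList.length : Int) - (k : Nat)) = ((w1.toList.length - k : Nat) : Int) := by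
    push_cast [Nat.le_of_lt hk]; ring
  have e2 : (1 : Int) + (k : Nat) = ((1 + k : Nat) : Int) := by push_cast; ring
  have e3 : (1 : Int) = ((1 : Nat) : Int) := by norm_num
  rw [e1, e2, e3, PySem.List.slice_from_natCast, PySem.List.slice_from_natCast,
      PySem.List.slice_from_natCast, PySem.List.slice_natCast, PySem.List.slice_natCast]
  have e4 : 1 + k - 1 = k := by omega
  rw [e4]
  rw [if_congr (condA1_iff w1.toList w2.toList k hk h1) rfl rfl]
  rw [if_congr (condA2_iff w1.toList w2.toList k hk h2) rfl rfl]

theorem top_eq (words : List String) (hnul : ∀ w ∈ words, '\x00' ∉ w.toList) :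
    get_word_to_merges words = get_word_to_merges_alt words := by
  unfold get_word_to_merges get_word_to_merges_alt
  congr 1
  congr 1
  rw [PySem.List.enumerate_eq_map_pyRange words ""]
  have hlen : PySem.List.len words = (words.length : Int) := by simp
  rw [hlen, PySem.List.pyRange_zero_natCast, List.foldl_map, List.foldl_map]
  apply PySem.List.foldl_congr_mem
  intro acc i hi
  rw [List.mem_range] at hi
  dsimp only
  rw [PySem.List.pyGetD_natCast]
  have e1 : ((i : Int) + 1) = ((i + 1 : Nat) : Int) := by push_cast; ring
  rw [e1, PySem.List.pyRange_one, List.foldl_map, List.range'_eq_map_range, List.foldl_map]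
  have e2 : (((words.length : Int) - ((i + 1 : Nat) : Int))).toNat = words.length - (i + 1) := by
    omega
  rw [e2]
  apply PySem.List.foldl_congr_mem
  intro acc2 k hk
  rw [List.mem_range] at hk
  dsimp only
  have e3 : ((i + 1 : Nat) : Int) + (k : Nat) = (((i + 1) + k : Nat) : Int) := by push_cast; ring
  rw [e3, PySem.List.pyGetD_natCast]
  have hj : (i + 1) + k < words.length := by omega
  have ha : words.getD i "" ∈ words := by
    rw [List.getD_eq_getElem?_getD, List.getElem?_eq_getElem (by omega)]
    exact List.getElem_mem _
  have hb : words.getD ((i + 1) + k) "" ∈ words := by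
    rw [List.getD_eq_getElem?_getD, List.getElem?_eq_getElem hj]
    exact List.getElem_mem _
  set a := words.getD i "" with hadef
  set b := words.getD ((i + 1) + k) "" with hbdef
  by_cases hab : a < b
  · simp [hab, get_all_merges_eq a b (hnul a ha) (hnul b hb)]
  · simp [hab, get_all_merges_eq b a (hnul b hb) (hnul a ha)]

-- ===== VERDICT (by name: the statement is the Claim_ definition above) =====
theorem get_word_to_merges_spec : Claim_equal_get_word_to_merges := by
  intro words hdom
  unfold Spec_get_word_to_merges
  apply top_eq
  intro w hw hmem
  unfold Dom_get_word_to_merges at hdom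
  have h1 : pvDomStr w = true := (List.all_eq_true.mp hdom) w hw
  have h2 : pvDomChar '\x00' = true := (List.all_eq_true.mp h1) _ hmem
  exact absurd h2 (by decide)
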